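-- pv_equiv track=rewrite | github.com/asweigart/programmedpatterns | book/visualpatterns.py | formula71
-- ===== SOURCE A (Python) =====
-- def formula71(step):
--     width = 2
--     height = 1
--     for i in range(2, step + 1):
--         if i % 3 == 2:
--             width += 1
--         elif i % 3 == 0:
--             width += 3
--             height += 3
--         elif i % 3 == 1:
--             width += 4
--     return width * height
-- ===== SOURCE B (Python) =====
-- def formula71(step):
--     if step < 2:
--         return 2
--     c0 = step // 3            # i in [2, step] with i % 3 == 0
--     c1 = (step - 1) // 3      # i in [2, step] with i % 3 == 1
--     c2 = (step - 2) // 3 + 1  # i in [2, step] with i % 3 == 2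
--     width = 2 + c2 + 3 * c0 + 4 * c1
--     height = 1 + 3 * c0
--     return width * height
-- ===== Notes on version B (the rewrite author's own statement) =====
-- stated objective: faster
-- what changed: Replaced the per-step loop accumulating width/height by a closed form counting each residue class mod 3 in range(2, step+1) with floor division.
import Mathlib
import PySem

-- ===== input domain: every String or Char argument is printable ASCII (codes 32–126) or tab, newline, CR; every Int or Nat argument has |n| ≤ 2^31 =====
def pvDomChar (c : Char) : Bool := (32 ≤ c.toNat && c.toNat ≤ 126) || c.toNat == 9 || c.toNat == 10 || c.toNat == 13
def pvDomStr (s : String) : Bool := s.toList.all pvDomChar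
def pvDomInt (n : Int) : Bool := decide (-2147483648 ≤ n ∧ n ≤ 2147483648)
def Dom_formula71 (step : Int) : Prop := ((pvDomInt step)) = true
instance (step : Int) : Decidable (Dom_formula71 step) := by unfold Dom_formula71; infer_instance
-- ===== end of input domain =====

-- B replaces A's per-step loop by an O(1) closed form counting residue classes mod 3 (objective: faster).

-- ===== PORT A =====
def formula71Body (wh : Int × Int) (i : Int) : Int × Int :=
  if PySem.Int.mod i 3 = 2 then (wh.1 + 1, wh.2)
  else if PySem.Int.mod i 3 = 0 then (wh.1 + 3, wh.2 + 3)
  else if PySem.Int.mod i 3 = 1 then (wh.1 + 4, wh.2)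
  else wh

def formula71 (step : Int) : Int :=
  let st := (PySem.List.pyRange 2 (step + 1) 1).foldl formula71Body (2, 1)
  st.1 * st.2

-- ===== PORT B =====
def formula71_alt (step : Int) : Int :=
  if step < 2 then 2
  else
    let c0 := PySem.Int.floordiv step 3
    let c1 := PySem.Int.floordiv (step - 1) 3
    let c2 := PySem.Int.floordiv (step - 2) 3 + 1
    (2 + c2 + 3 * c0 + 4 * c1) * (1 + 3 * c0)

-- ===== PRECONDITION & SPEC =====
def Spec_formula71 (step : Int) (out : Int) : Prop := out = formula71_alt step
instance (step : Int) (out : Int) : Decidable (Spec_formula71 step out) := by unfold Spec_formula71; infer_instance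

-- ===== CLAIM (what is proved, stated in full; the proofs are below) =====
def Claim_equal_formula71 : Prop := ∀ (step : Int), Dom_formula71 step → Spec_formula71 step (formula71 step)

-- ===== LEMMAS AND PROOFS =====

-- closed form of A's loop state after processing range(2, n+1), for n ≥ 1
lemma formula71_loop_eq (n : Int) (h : 1 ≤ n) :
    (PySem.List.pyRange 2 (n + 1) 1).foldl formula71Body (2, 1)
      = (2 + ((n - 2) / 3 + 1) + 3 * (n / 3) + 4 * ((n - 1) / 3), 1 + 3 * (n / 3)) := by
  induction n, h using Int.le_induction with
  | base =>
      rw [PySem.List.pyRange_one_eq_nil (by omega)]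
      simp only [List.foldl_nil]
      decide
  | succ n hn ih =>
      rw [show n + 1 + 1 = (n + 1) + 1 from rfl,
        PySem.List.pyRange_one_succ_right (by omega), List.foldl_append, ih]
      simp only [List.foldl_cons, List.foldl_nil, formula71Body,
        PySem.Int.mod_eq_emod_of_pos (by norm_num : (0:Int) < 3)]
      split_ifs with h2 h0 h1 <;> exact Prod.ext (by omega) (by omega)

-- ===== VERDICT (by name: the statement is the Claim_ definition above) =====
theorem formula71_spec : Claim_equal_formula71 := by
  intro step _
  unfold Spec_formula71 formula71 formula71_alt
  by_cases h : step < 2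
  · rw [PySem.List.pyRange_one_eq_nil (by omega)]
    simp [h]
  · rw [formula71_loop_eq step (by omega)]
    simp only [if_neg h,
      PySem.Int.floordiv_eq_ediv_of_pos (by norm_num : (0:Int) < 3)]
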